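-- pv_equiv track=rewrite | github.com/Aasthaengg/IBMdataset | Python_codes/p02973/s916429637.py | solve
-- ===== SOURCE A (Python) =====
-- from bisect import bisect_left, bisect_right, bisect, insort_left, insort_right, insort
--
-- def solve(N,A):
--     ans = 0
--     lis = []
--     for i in range(N):
--         ind = bisect_right(lis,-A[i])
--         if ind == len(lis):
--             lis.append(-A[i])
--         else:
--             lis[ind] = -A[i]
--     ans = len(lis)
--     return ans
-- ===== SOURCE B (Python) =====
-- def solve(N, A):
--     # O(N^2) dynamic program: dp[i] = length of the longest non-increasing
--     # subsequence of the first N elements ending at index i; answer = best dp.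
--     dp = []
--     best = 0
--     for i in range(N):
--         x = A[i]
--         m = 0
--         for j in range(i):
--             if A[j] >= x and dp[j] > m:
--                 m = dp[j]
--         dp.append(m + 1)
--         if m + 1 > best:
--             best = m + 1
--     return best
-- ===== Notes on version B (the rewrite author's own statement) =====
-- stated objective: alternative
-- what changed: Replaced the patience-sorting strategy (maintaining a sorted tails array with bisect_right and in-place replacement) by the direct O(N^2) dynamic program dp[i] = 1 + max(dp[j] for j<i with A[j] >= A[i]), returning the maximum dp value.
import Mathlib
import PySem

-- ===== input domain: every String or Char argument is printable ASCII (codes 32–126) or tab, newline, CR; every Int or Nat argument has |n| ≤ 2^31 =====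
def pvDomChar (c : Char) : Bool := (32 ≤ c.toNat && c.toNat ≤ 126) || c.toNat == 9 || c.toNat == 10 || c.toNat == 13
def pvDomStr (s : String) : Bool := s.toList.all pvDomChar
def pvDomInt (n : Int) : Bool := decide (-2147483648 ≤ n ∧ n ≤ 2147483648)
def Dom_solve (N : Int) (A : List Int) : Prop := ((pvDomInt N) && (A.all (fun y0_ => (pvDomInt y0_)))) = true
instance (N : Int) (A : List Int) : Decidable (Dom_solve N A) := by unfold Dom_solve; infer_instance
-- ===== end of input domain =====

-- B replaces A's patience-sorting (sorted tails + bisect_right) by the direct O(N^2)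
-- dynamic program for the longest non-increasing subsequence; same return value on 0 ≤ N ≤ len(A).

-- ===== PORT A =====
-- bisect.bisect_right on the (always sorted) list lis: insertion point after equal elements.
def bisectRight (l : List Int) (x : Int) : Nat :=
  (l.takeWhile (fun y => decide (y ≤ x))).length

-- one iteration of A's loop body: insert -A[i] into lis patience-style
def astep (lis : List Int) (v : Int) : List Int :=
  let x := -v
  let ind := bisectRight lis x
  if ind = lis.length then lis ++ [x] else lis.set ind x

def solve (N : Int) (A : List Int) : Int :=
  (((PySem.List.pyRange 0 N 1).foldl
    (fun lis i =>
      match PySem.List.pyGet? A i with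
      | none => lis            -- IndexError in Python; excluded by Pre_solve
      | some v => astep lis v) []).length : Int)

-- ===== PORT B =====
def solve_alt (N : Int) (A : List Int) : Int :=
  (((PySem.List.pyRange 0 N 1).foldl
      (fun st i =>
        match PySem.List.pyGet? A i with
        | none => st                       -- IndexError in Python; excluded by Pre_solve
        | some x =>
          -- inner loop: m = max over j < i with A[j] >= x of dp[j]
          -- (j < i is always in range for A and dp here, so pyGetD's default is never used)
          let m := (PySem.List.pyRange 0 i 1).foldl
            (fun m j =>
              if x ≤ PySem.List.pyGetD A j 0 ∧ m < PySem.List.pyGetD st.1 j 0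
              then PySem.List.pyGetD st.1 j 0 else m) 0
          (st.1 ++ [m + 1], max st.2 (m + 1)))
      (([] : List Nat), (0 : Nat))).2 : Int)

-- ===== PRECONDITION & SPEC =====
-- Pre_ excludes exactly the inputs with N > len(A), on which the Python A raises IndexError.
def Pre_solve (N : Int) (A : List Int) : Prop := N ≤ A.length
instance (N : Int) (A : List Int) : Decidable (Pre_solve N A) := by unfold Pre_solve; infer_instance

def pvWitness_solve : Int × List Int := (3, [3, 1, 2])

def Spec_solve (N : Int) (A : List Int) (out : Int) : Prop := out = solve_alt N A
instance (N : Int) (A : List Int) (out : Int) : Decidable (Spec_solve N A out) := by unfold Spec_solve; infer_instance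

-- ===== CLAIM (what is proved, stated in full; the proofs are below) =====
def Claim_equal_solve : Prop := ∀ (N : Int) (A : List Int), Dom_solve N A → Pre_solve N A → Spec_solve N A (solve N A)

-- ===== LEMMAS AND PROOFS =====

-- proof-side restatement of B's loops over (value, dp) pairs instead of indices
def pairInner (x : Int) (pref : List (Int × Nat)) : Nat :=
  pref.foldl (fun m p => if x ≤ p.1 ∧ m < p.2 then p.2 else m) 0

def pairLoop : List Int → List (Int × Nat) → Nat → Nat
  | [], _, best => best
  | x :: rs, pref, best =>
      let m := pairInner x pref
      pairLoop rs (pref ++ [(x, m + 1)]) (max best (m + 1))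

-- ----- facts about bisectRight via takeWhile -----
theorem br_cons (a : Int) (l : List Int) (x : Int) :
    bisectRight (a :: l) x = if a ≤ x then bisectRight l x + 1 else 0 := by
  by_cases h : a ≤ x <;> simp [bisectRight, List.takeWhile_cons, h]

theorem br_le (l : List Int) (x : Int) : bisectRight l x ≤ l.length := by
  induction l with
  | nil => simp [bisectRight]
  | cons a l ih =>
      rw [br_cons]
      by_cases h : a ≤ x <;> simp [h] <;> omega

theorem br_lt (l : List Int) (x : Int) (j : Nat) (h : j < bisectRight l x) :
    l.getD j 0 ≤ x := by
  induction l generalizing j with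
  | nil => simp [bisectRight] at h
  | cons a l ih =>
      rw [br_cons] at h
      by_cases hax : a ≤ x
      · simp [hax] at h
        cases j with
        | zero => simpa using hax
        | succ j => simpa using ih j (by omega)
      · simp [hax] at h
  
theorem br_boundary (l : List Int) (x : Int) (h : bisectRight l x < l.length) :
    x < l.getD (bisectRight l x) 0 := by
  induction l with
  | nil => simp at h
  | cons a l ih =>
      rw [br_cons] at h ⊢
      by_cases hax : a ≤ x
      · simp [hax] at h ⊢
        exact ih (by omega)
      · simp [hax]; omega

-- ----- getD facts -----
theorem getD_app_lt (l : List Int) (a : Int) (j : Nat) (h : j < l.length) :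
    (l ++ [a]).getD j 0 = l.getD j 0 := by
  simp [List.getD_eq_getElem?_getD, List.getElem?_append_left h]

theorem getD_app_len (l : List Int) (a : Int) :
    (l ++ [a]).getD l.length 0 = a := by
  simp [List.getD_eq_getElem?_getD]

theorem getD_set_self (l : List Int) (i : Nat) (a : Int) (h : i < l.length) :
    (l.set i a).getD i 0 = a := by
  simp [List.getD_eq_getElem?_getD, List.getElem?_set, h]

theorem getD_set_ne (l : List Int) (i : Nat) (a : Int) (j : Nat) (h : i ≠ j) :
    (l.set i a).getD j 0 = l.getD j 0 := by
  simp [List.getD_eq_getElem?_getD, List.getElem?_set, h]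

-- ----- the loop invariant -----
def SortedD (l : List Int) : Prop :=
  ∀ i j : Nat, i < j → j < l.length → l.getD i 0 ≤ l.getD j 0

def LoopInv (pref : List (Int × Nat)) (lis : List Int) : Prop :=
  SortedD lis ∧
  (∀ k : Nat, k < lis.length →
      (∃ p ∈ pref, p.2 = k + 1 ∧ lis.getD k 0 = -p.1) ∧
      (∀ p ∈ pref, p.2 = k + 1 → lis.getD k 0 ≤ -p.1)) ∧
  (∀ p ∈ pref, 1 ≤ p.2 ∧ p.2 ≤ lis.length)

-- characterisation of B's inner maximum
theorem inner_fold (x : Int) (pref : List (Int × Nat)) (b : Nat) :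
    b ≤ pref.foldl (fun m p => if x ≤ p.1 ∧ m < p.2 then p.2 else m) b ∧
    (∀ p ∈ pref, x ≤ p.1 → p.2 ≤ pref.foldl (fun m p => if x ≤ p.1 ∧ m < p.2 then p.2 else m) b) ∧
    (pref.foldl (fun m p => if x ≤ p.1 ∧ m < p.2 then p.2 else m) b = b ∨
      ∃ p ∈ pref, x ≤ p.1 ∧ p.2 = pref.foldl (fun m p => if x ≤ p.1 ∧ m < p.2 then p.2 else m) b) := by
  induction pref generalizing b with
  | nil => simp
  | cons q pref ih =>
      simp only [List.foldl_cons]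
      set b' := if x ≤ q.1 ∧ b < q.2 then q.2 else b with hb'
      obtain ⟨h1, h2, h3⟩ := ih b'
      have hbb' : b ≤ b' := by rw [hb']; split <;> omega
      refine ⟨le_trans hbb' h1, ?_, ?_⟩
      · intro p hp hxp
        rcases List.mem_cons.mp hp with hp | hp
        · subst hp
          by_cases hlt : b < p.2
          · have : b' = p.2 := by rw [hb']; simp [hxp, hlt]
            omega
          · omega
        · exact h2 p hp hxp
      · rcases h3 with h3 | ⟨p, hp, hx, he⟩
        · by_cases hc : x ≤ q.1 ∧ b < q.2
          · right; exact ⟨q, by simp, hc.1, by rw [h3, hb', if_pos hc]⟩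
          · left; rw [h3, hb', if_neg hc]
        · right; exact ⟨p, List.mem_cons_of_mem _ hp, hx, he⟩

theorem pairInner_spec (x : Int) (pref : List (Int × Nat)) :
    (∀ p ∈ pref, x ≤ p.1 → p.2 ≤ pairInner x pref) ∧
    (pairInner x pref = 0 ∨ ∃ p ∈ pref, x ≤ p.1 ∧ p.2 = pairInner x pref) := by
  obtain ⟨_, h2, h3⟩ := inner_fold x pref 0
  exact ⟨h2, h3⟩

-- the computed maximum equals the bisect insertion point
theorem m_eq_ind (pref : List (Int × Nat)) (lis : List Int) (x : Int)
    (hI : LoopInv pref lis) : pairInner x pref = bisectRight lis (-x) := by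
  obtain ⟨hs, h2, h3⟩ := hI
  obtain ⟨hub, hex⟩ := pairInner_spec x pref
  set m := pairInner x pref
  set ind := bisectRight lis (-x) with hind
  have hbrle := br_le lis (-x)
  -- ind ≤ m
  have h1 : ind ≤ m := by
    by_cases h0 : ind = 0
    · omega
    · have hk : ind - 1 < lis.length := by omega
      obtain ⟨⟨p, hp, hp2, hpv⟩, _⟩ := h2 (ind - 1) hk
      have hle : lis.getD (ind - 1) 0 ≤ -x := br_lt lis (-x) (ind - 1) (by omega)
      have hxp : x ≤ p.1 := by omega
      have := hub p hp hxp
      omega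
  -- m ≤ ind
  have h2' : m ≤ ind := by
    by_contra hcon
    push_neg at hcon
    rcases hex with h0 | ⟨p, hp, hxp, hpm⟩
    · omega
    · have hmlen : p.2 ≤ lis.length := (h3 p hp).2
      have hindlt : ind < lis.length := by omega
      have hbnd : -x < lis.getD ind 0 := br_boundary lis (-x) hindlt
      have hkk : m - 1 < lis.length := by omega
      obtain ⟨_, hmin⟩ := h2 (m - 1) hkk
      have hlek : lis.getD (m - 1) 0 ≤ -p.1 := hmin p hp (by omega)
      have hle : lis.getD (m - 1) 0 ≤ -x := by omega
      by_cases heq : ind = m - 1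
      · rw [← heq] at hle; omega
      · have := hs ind (m - 1) (by omega) hkk
        omega
  omega

-- the invariant is preserved by one step, and the new length is max best (m+1)
theorem step_preserve (pref : List (Int × Nat)) (lis : List Int) (x : Int)
    (hI : LoopInv pref lis) :
    LoopInv (pref ++ [(x, pairInner x pref + 1)]) (astep lis x) ∧
    (astep lis x).length = max lis.length (pairInner x pref + 1) := by
  obtain ⟨hs, h2, h3⟩ := hI
  have hm := m_eq_ind pref lis x ⟨hs, h2, h3⟩
  set m := pairInner x pref
  set ind := bisectRight lis (-x) with hind
  have hbrle := br_le lis (-x)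
  unfold astep
  simp only [← hind]
  by_cases hcase : ind = lis.length
  · -- append case
    rw [if_pos hcase]
    have hall : ∀ j, j < lis.length → lis.getD j 0 ≤ -x := by
      intro j hj; exact br_lt lis (-x) j (by omega)
    constructor
    · refine ⟨?_, ?_, ?_⟩
      · intro i j hij hj
        simp only [List.length_append, List.length_cons, List.length_nil] at hj
        by_cases hjn : j < lis.length
        · rw [getD_app_lt _ _ _ hjn, getD_app_lt _ _ _ (by omega)]
          exact hs i j hij hjn
        · have hje : j = lis.length := by omega
          subst hje
          rw [getD_app_len, getD_app_lt _ _ _ (by omega)]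
          exact hall i (by omega)
      · intro k hk
        simp only [List.length_append, List.length_cons, List.length_nil] at hk
        by_cases hkn : k < lis.length
        · obtain ⟨⟨p, hp, hp2, hpv⟩, hmin⟩ := h2 k hkn
          rw [getD_app_lt _ _ _ hkn]
          refine ⟨⟨p, List.mem_append_left _ hp, hp2, hpv⟩, ?_⟩
          intro q hq hq2
          rcases List.mem_append.mp hq with hq | hq
          · exact hmin q hq hq2
          · simp at hq
            subst hq
            simp at hq2
            have := (h3 p hp).2
            omega
        · have hke : k = lis.length := by omega
          subst hke
          rw [getD_app_len]
          refine ⟨⟨(x, m + 1), List.mem_append_right _ (by simp), by simp; omega, by simp⟩, ?_⟩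
          intro q hq hq2
          rcases List.mem_append.mp hq with hq | hq
          · have := (h3 q hq).2; omega
          · simp at hq; subst hq; simp
      · intro p hp
        simp only [List.length_append, List.length_cons, List.length_nil]
        rcases List.mem_append.mp hp with hp | hp
        · have := h3 p hp; omega
        · simp at hp; subst hp; simp; omega
    · simp; omega
  · -- set case
    rw [if_neg hcase]
    have hindlt : ind < lis.length := by omega
    have hbnd : -x < lis.getD ind 0 := br_boundary lis (-x) hindlt
    constructor
    · refine ⟨?_, ?_, ?_⟩
      · intro i j hij hj
        simp only [List.length_set] at hj
        by_cases hi : ind = i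
        · subst hi
          rw [getD_set_self _ _ _ hindlt, getD_set_ne _ _ _ _ (by omega)]
          have := hs ind j hij hj
          omega
        · rw [getD_set_ne _ _ _ _ hi]
          by_cases hjj : ind = j
          · subst hjj
            rw [getD_set_self _ _ _ hindlt]
            exact br_lt lis (-x) i (by omega)
          · rw [getD_set_ne _ _ _ _ hjj]
            exact hs i j hij hj
      · intro k hk
        simp only [List.length_set] at hk
        by_cases hke : ind = k
        · subst hke
          rw [getD_set_self _ _ _ hindlt]
          refine ⟨⟨(x, m + 1), List.mem_append_right _ (by simp), by simp; omega, by simp⟩, ?_⟩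
          intro q hq hq2
          rcases List.mem_append.mp hq with hq | hq
          · obtain ⟨_, hmin⟩ := h2 ind hindlt
            have := hmin q hq (by omega)
            omega
          · simp at hq; subst hq; simp
        · obtain ⟨⟨p, hp, hp2, hpv⟩, hmin⟩ := h2 k hk
          rw [getD_set_ne _ _ _ _ hke]
          refine ⟨⟨p, List.mem_append_left _ hp, hp2, hpv⟩, ?_⟩
          intro q hq hq2
          rcases List.mem_append.mp hq with hq | hq
          · exact hmin q hq hq2
          · simp at hq
            subst hq
            simp at hq2
            omega
      · intro p hp
        simp only [List.length_set]
        rcases List.mem_append.mp hp with hp | hp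
        · exact h3 p hp
        · simp at hp; subst hp; simp; omega
    · simp; omega

-- the main simulation: B's loop computes the length of A's patience list
theorem main_loop (rest : List Int) (pref : List (Int × Nat)) (lis : List Int)
    (hI : LoopInv pref lis) :
    pairLoop rest pref lis.length = (rest.foldl astep lis).length := by
  induction rest generalizing pref lis with
  | nil => simp [pairLoop]
  | cons x rs ih =>
      obtain ⟨hI', hlen⟩ := step_preserve pref lis x hI
      simp only [pairLoop, List.foldl_cons]
      rw [← hlen] at *
      exact ih _ _ hI'

theorem inv_nil : LoopInv [] [] := by
  refine ⟨?_, ?_, ?_⟩ <;> simp [SortedD]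

-- A's range-indexed fold equals a fold over the prefix A.take k
theorem range_fold (A : List Int) (k : Nat) (hk : k ≤ A.length) :
    (PySem.List.pyRange 0 (k : Int) 1).foldl
      (fun lis i =>
        match PySem.List.pyGet? A i with
        | none => lis
        | some v => astep lis v) [] =
    (A.take k).foldl astep [] := by
  induction k with
  | zero => simp [PySem.List.pyRange_zero_nat]
  | succ k ih =>
      have hkA : k < A.length := by omega
      have hcast : ((k + 1 : Nat) : Int) = (k : Int) + 1 := by push_cast; ring
      rw [hcast, PySem.List.pyRange_one_succ_right (by positivity), List.foldl_append,
        ih (by omega)]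
      have htake : A.take (k + 1) = A.take k ++ [A[k]] := by
        rw [List.take_add_one, List.getElem?_eq_getElem hkA]; simp
      rw [htake, List.foldl_append]
      simp [PySem.List.pyGet?_natCast, List.getElem?_eq_getElem hkA, List.foldl_cons]

-- bridge: B's index-based inner loop equals the pair-based pairInner fold
theorem inner_bridge (A : List Int) (x : Int) :
    ∀ (tail pref : List (Int × Nat)) (b : Nat),
      (pref ++ tail).map Prod.fst = A.take (pref.length + tail.length) →
      (PySem.List.pyRange (pref.length : Int) ((pref.length + tail.length : Nat) : Int) 1).foldl
        (fun m j =>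
          if x ≤ PySem.List.pyGetD A j 0 ∧ m < PySem.List.pyGetD ((pref ++ tail).map Prod.snd) j 0
          then PySem.List.pyGetD ((pref ++ tail).map Prod.snd) j 0 else m) b
      = tail.foldl (fun m p => if x ≤ p.1 ∧ m < p.2 then p.2 else m) b := by
  intro tail
  induction tail with
  | nil =>
      intro pref b _
      rw [PySem.List.pyRange_one_eq_nil (by simp)]
      simp
  | cons p tl ih =>
      intro pref b hA
      have hlenA : pref.length + (p :: tl).length ≤ A.length := by
        have := congrArg List.length hA
        simp at this ⊢
        omega
      have hsl : pref.length < (pref ++ p :: tl).length := by simp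
      have hgetA : A.getD pref.length 0 = p.1 := by
        have h1 : ((pref ++ p :: tl).map Prod.fst)[pref.length]? = some p.1 := by
          rw [List.getElem?_map, List.getElem?_append_right (le_refl _)]
          simp
        rw [hA] at h1
        rw [List.getElem?_take_of_lt (by simp)] at h1
        simp [List.getD_eq_getElem?_getD, h1]
      have hgetD : ((pref ++ p :: tl).map Prod.snd).getD pref.length 0 = p.2 := by
        have h1 : ((pref ++ p :: tl).map Prod.snd)[pref.length]? = some p.2 := by
          rw [List.getElem?_map, List.getElem?_append_right (le_refl _)]
          simp
        simp [List.getD_eq_getElem?_getD, h1]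
      rw [PySem.List.pyRange_one_cons (by push_cast; simp), List.foldl_cons,
        List.foldl_cons]
      have hstep :
          (if x ≤ PySem.List.pyGetD A (pref.length : Int) 0 ∧
              b < PySem.List.pyGetD ((pref ++ p :: tl).map Prod.snd) (pref.length : Int) 0
           then PySem.List.pyGetD ((pref ++ p :: tl).map Prod.snd) (pref.length : Int) 0 else b)
          = (if x ≤ p.1 ∧ b < p.2 then p.2 else b) := by
        simp only [PySem.List.pyGetD_natCast, hgetA, hgetD]
      rw [hstep]
      have hre : pref ++ p :: tl = (pref ++ [p]) ++ tl := by simp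
      have hlen1 : pref.length + (p :: tl).length = (pref ++ [p]).length + tl.length := by
        simp; omega
      have hcast : ((pref.length : Int) + 1) = (((pref ++ [p]).length : Nat) : Int) := by
        simp
      rw [hcast, hlen1, hre]
      exact ih (pref ++ [p]) _ (by rw [← hre, ← hlen1, hA])

-- bridge: B's index-based outer loop equals the pair-based pairLoop
theorem outer_bridge (A : List Int) :
    ∀ (n s : Nat) (pref : List (Int × Nat)) (best : Nat),
      s = pref.length → s + n ≤ A.length → pref.map Prod.fst = A.take s →
      ((PySem.List.pyRange (s : Int) ((s + n : Nat) : Int) 1).foldl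
        (fun st i =>
          match PySem.List.pyGet? A i with
          | none => st
          | some x =>
            let m := (PySem.List.pyRange 0 i 1).foldl
              (fun m j =>
                if x ≤ PySem.List.pyGetD A j 0 ∧ m < PySem.List.pyGetD st.1 j 0
                then PySem.List.pyGetD st.1 j 0 else m) 0
            (st.1 ++ [m + 1], max st.2 (m + 1)))
        (pref.map Prod.snd, best)).2
      = pairLoop ((A.drop s).take n) pref best := by
  intro n
  induction n with
  | zero =>
      intro s pref best _ _ _
      rw [PySem.List.pyRange_one_eq_nil (by omega)]
      simp [pairLoop]
  | succ n ih =>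
      intro s pref best hs hn hA
      have hsA : s < A.length := by omega
      rw [PySem.List.pyRange_one_cons (by push_cast; omega), List.foldl_cons]
      have hget : PySem.List.pyGet? A (s : Int) = some A[s] := by
        rw [PySem.List.pyGet?_natCast]
        exact List.getElem?_eq_getElem hsA
      simp only [hget]
      have hinner := inner_bridge A A[s] pref [] 0
        (by simp only [List.nil_append, List.length_nil, Nat.zero_add]; rw [← hs]; exact hA)
      simp only [List.nil_append, List.length_nil, Nat.zero_add, Nat.cast_zero] at hinner
      rw [← hs] at hinner
      simp only [hinner]
      have hdrop : (A.drop s).take (n + 1) = A[s] :: (A.drop (s + 1)).take n := by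
        rw [List.drop_eq_getElem_cons hsA, List.take_succ_cons]
      rw [hdrop]
      simp only [pairLoop, pairInner]
      have hmap : pref.map Prod.snd ++ [pref.foldl
            (fun m p => if A[s] ≤ p.1 ∧ m < p.2 then p.2 else m) 0 + 1]
          = (pref ++ [(A[s], pref.foldl
            (fun m p => if A[s] ≤ p.1 ∧ m < p.2 then p.2 else m) 0 + 1)]).map Prod.snd := by
        simp
      have hcast2 : ((s + (n + 1) : Nat) : Int) = (((s + 1) + n : Nat) : Int) := by
        push_cast; ring
      have hcast3 : ((s : Int) + 1) = (((s + 1 : Nat)) : Int) := by push_cast; ring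
      rw [hcast2, hcast3, hmap]
      exact ih (s + 1) _ _ (by simp; omega) (by omega)
        (by
          simp only [List.map_append, hA, List.map_cons, List.map_nil]
          rw [List.take_add_one, List.getElem?_eq_getElem hsA]
          simp)

-- ===== VERDICT (by name: the statement is the Claim_ definition above) =====
theorem solve_spec : Claim_equal_solve := by
  intro N A _ hPre
  unfold Spec_solve solve solve_alt
  by_cases hneg : N < 0
  · rw [PySem.List.pyRange_one_eq_nil (by omega)]
    simp
  · have hN0 : 0 ≤ N := by omega
    have hN : N = ((N.toNat : Nat) : Int) := by omega
    have hrf := range_fold A N.toNat (by unfold Pre_solve at hPre; omega)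
    rw [← hN] at hrf
    rw [hrf]
    have hob := outer_bridge A N.toNat 0 [] 0 rfl
      (by unfold Pre_solve at hPre; omega) (by simp)
    simp only [Nat.cast_zero, Nat.zero_add, List.drop_zero, List.map_nil] at hob
    rw [← hN] at hob
    rw [hob]
    have hml := main_loop (A.take N.toNat) [] [] inv_nil
    simp only [List.length_nil] at hml
    rw [← hml]
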